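-- pv_equiv track=rewrite | github.com/desihub/desitarget | py/desitarget/train/data_collection/QSOs_from_VI.py | build_list_name
-- ===== SOURCE A (Python) =====
-- def reorganise(lst):
--     for elt in lst:
--         elt[1], elt[2], elt[3] = elt[2], elt[3], elt[1]
--     return lst
--
-- def correct_number(lst):
--     for j in range(len(lst)):
--         for i in [0, 2, 3, 5]:
--             if len(lst[j][i]) == 1:
--                 lst[j][i] = f'00{lst[j][i]}'
--             elif len(lst[j][i]) == 2:
--                 lst[j][i] = f'0{lst[j][i]}'
--     return lst
--
-- def build_list_name(ra, dec):
--     lst = []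
--     for i in range(len(ra)):
--         ra1, ra2 = str(ra[i][0]), str(ra[i][1])
--         dec1, dec2 = dec[i][0], dec[i][1]
--
--         if dec1<0:
--             dec1 = str(dec1)[1:]
--             sgn1 = 'm'
--         else:
--             dec1 = str(dec1)
--             sgn1 = 'p'
--         if dec2<0:
--             dec2 = str(dec2)[1:]
--             sgn2 = 'm'
--         else:
--             dec2 = str(dec2)
--             sgn2 = 'p'
--         lst += [[ra1, ra2, sgn1, dec1, sgn2, dec2]]
--     return correct_number(reorganise(lst))
-- ===== SOURCE B (Python) =====
-- def build_list_name(ra, dec):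
--     def pad(s):
--         if len(s) == 1:
--             return '00' + s
--         if len(s) == 2:
--             return '0' + s
--         return s
--     out = []
--     for r, d in zip(ra, dec):
--         d1, d2 = d[0], d[1]
--         out.append([pad(str(r[0])),
--                     'm' if d1 < 0 else 'p',
--                     pad(str(abs(d1))),
--                     pad(str(r[1])),
--                     'm' if d2 < 0 else 'p',
--                     pad(str(abs(d2)))])
--     return out
-- ===== Notes on version B (the rewrite author's own statement) =====
-- stated objective: simpler
-- what changed: One zip-driven pass that emits each row already in final form (sign/abs and zero-padding inlined), replacing A's build-then-reorganise-then-correct_number three-pass pipeline with its in-place index mutation.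
import Mathlib
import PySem

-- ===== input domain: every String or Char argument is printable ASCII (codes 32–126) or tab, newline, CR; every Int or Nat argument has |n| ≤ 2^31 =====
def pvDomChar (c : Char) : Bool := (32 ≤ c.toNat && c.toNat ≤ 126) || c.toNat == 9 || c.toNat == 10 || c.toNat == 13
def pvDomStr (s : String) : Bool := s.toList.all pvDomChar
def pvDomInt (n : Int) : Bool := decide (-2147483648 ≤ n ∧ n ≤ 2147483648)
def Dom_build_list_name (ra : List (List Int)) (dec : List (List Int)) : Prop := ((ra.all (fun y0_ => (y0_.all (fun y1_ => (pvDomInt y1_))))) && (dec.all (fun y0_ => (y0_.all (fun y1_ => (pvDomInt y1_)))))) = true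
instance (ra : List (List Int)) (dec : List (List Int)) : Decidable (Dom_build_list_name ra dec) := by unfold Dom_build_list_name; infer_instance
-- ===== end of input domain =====

-- B replaces A's three passes (build rows, reorganise's column swap, correct_number's padding pass)
-- by one zip-driven pass emitting each row already in final form; return-value equivalence only
-- (A mutates only its local list, never its arguments).

-- ===== PORT A =====
-- loop body of reorganise: elt[1], elt[2], elt[3] = elt[2], elt[3], elt[1]
def reorganiseRow (elt : List String) : List String :=
  let a := PySem.List.pyGetD elt 2 ""
  let b := PySem.List.pyGetD elt 3 ""
  let c := PySem.List.pyGetD elt 1 ""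
  PySem.List.pySetD (PySem.List.pySetD (PySem.List.pySetD elt 1 a) 2 b) 3 c

def reorganisePy (lst : List (List String)) : List (List String) :=
  lst.map reorganiseRow

-- body of correct_number's inner loop: lst[j][i] gets zero-padded in place
def correctStepPy (row : List String) (i : Int) : List String :=
  let s := PySem.List.pyGetD row i ""
  if PySem.Str.len s = 1 then PySem.List.pySetD row i ("00" ++ s)
  else if PySem.Str.len s = 2 then PySem.List.pySetD row i ("0" ++ s)
  else row

-- correct_number: for j in range(len(lst)): for i in [0, 2, 3, 5]: …  (iteration j touches only row j)
def correctNumberPy (lst : List (List String)) : List (List String) :=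
  lst.map (fun row => ([0, 2, 3, 5] : List Int).foldl correctStepPy row)

def build_list_name (ra : List (List Int)) (dec : List (List Int)) : List (List String) :=
  let lst := (PySem.List.pyRange 0 (PySem.List.len ra) 1).foldl
    (fun acc i =>
      let ra1 := PySem.Int.toStr (PySem.List.pyGetD (PySem.List.pyGetD ra i []) 0 0)
      let ra2 := PySem.Int.toStr (PySem.List.pyGetD (PySem.List.pyGetD ra i []) 1 0)
      let d1 := PySem.List.pyGetD (PySem.List.pyGetD dec i []) 0 0
      let d2 := PySem.List.pyGetD (PySem.List.pyGetD dec i []) 1 0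
      let dec1 := if d1 < 0 then PySem.Str.slice (PySem.Int.toStr d1) (some 1) none else PySem.Int.toStr d1
      let sgn1 := if d1 < 0 then "m" else "p"
      let dec2 := if d2 < 0 then PySem.Str.slice (PySem.Int.toStr d2) (some 1) none else PySem.Int.toStr d2
      let sgn2 := if d2 < 0 then "m" else "p"
      acc ++ [[ra1, ra2, sgn1, dec1, sgn2, dec2]]) []
  correctNumberPy (reorganisePy lst)

-- ===== PORT B =====
def padB (s : String) : String :=
  if PySem.Str.len s = 1 then "00" ++ s
  else if PySem.Str.len s = 2 then "0" ++ s
  else s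

def build_list_name_alt (ra : List (List Int)) (dec : List (List Int)) : List (List String) :=
  (ra.zip dec).map (fun rd =>
    let d1 := PySem.List.pyGetD rd.2 0 0
    let d2 := PySem.List.pyGetD rd.2 1 0
    [padB (PySem.Int.toStr (PySem.List.pyGetD rd.1 0 0)),
     if d1 < 0 then "m" else "p",
     padB (PySem.Int.toStr (if d1 < 0 then -d1 else d1)),
     padB (PySem.Int.toStr (PySem.List.pyGetD rd.1 1 0)),
     if d2 < 0 then "m" else "p",
     padB (PySem.Int.toStr (if d2 < 0 then -d2 else d2))])

-- ===== PRECONDITION & SPEC =====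
-- A raises IndexError when dec is shorter than ra or some row A indexes has fewer than 2 entries.
def Pre_build_list_name (ra : List (List Int)) (dec : List (List Int)) : Prop :=
  ra.length ≤ dec.length ∧ (∀ r ∈ ra, 2 ≤ r.length) ∧ (∀ d ∈ dec.take ra.length, 2 ≤ d.length)
instance (ra : List (List Int)) (dec : List (List Int)) : Decidable (Pre_build_list_name ra dec) := by unfold Pre_build_list_name; infer_instance
def pvWitness_build_list_name : List (List Int) × List (List Int) := ([[1, 234]], [[3, -4]])

def Spec_build_list_name (ra : List (List Int)) (dec : List (List Int)) (out : List (List String)) : Prop := out = build_list_name_alt ra dec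
instance (ra : List (List Int)) (dec : List (List Int)) (out : List (List String)) : Decidable (Spec_build_list_name ra dec out) := by unfold Spec_build_list_name; infer_instance

-- ===== CLAIM (what is proved, stated in full; the proofs are below) =====
def Claim_equal_build_list_name : Prop := ∀ (ra : List (List Int)) (dec : List (List Int)), Dom_build_list_name ra dec → Pre_build_list_name ra dec → Spec_build_list_name ra dec (build_list_name ra dec)

-- ===== LEMMAS AND PROOFS =====

-- str(n)[1:] = str(-n) for n < 0
theorem slice_toStr_neg (n : Int) (h : n < 0) :
    PySem.Str.slice (PySem.Int.toStr n) (some 1) none = PySem.Int.toStr (-n) := by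
  have h2 : (-n).toNat = n.natAbs := by omega
  have h3 : ¬ 0 < n := by omega
  simp [PySem.Str.slice, PySem.Int.toStr, PySem.Int.toChars, h, h3, PySem.List.slice_from_one, h2]

-- reorganise's swap, evaluated on a 6-element row
theorem reorg_eval (u v w x y z : String) :
    reorganiseRow [u, v, w, x, y, z] = [u, w, x, v, y, z] := rfl

-- correct_number's step, evaluated at each of the four indices of a 6-element row
theorem step_at0 (a b c d e f : String) :
    correctStepPy [a, b, c, d, e, f] 0 = [padB a, b, c, d, e, f] := by
  show (if PySem.Str.len a = 1 then PySem.List.pySetD [a,b,c,d,e,f] 0 ("00" ++ a)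
    else if PySem.Str.len a = 2 then PySem.List.pySetD [a,b,c,d,e,f] 0 ("0" ++ a)
    else [a,b,c,d,e,f]) = [padB a,b,c,d,e,f]
  unfold padB; split_ifs <;> rfl

theorem step_at2 (a b c d e f : String) :
    correctStepPy [a, b, c, d, e, f] 2 = [a, b, padB c, d, e, f] := by
  show (if PySem.Str.len c = 1 then PySem.List.pySetD [a,b,c,d,e,f] 2 ("00" ++ c)
    else if PySem.Str.len c = 2 then PySem.List.pySetD [a,b,c,d,e,f] 2 ("0" ++ c)
    else [a,b,c,d,e,f]) = [a,b,padB c,d,e,f]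
  unfold padB; split_ifs <;> rfl

theorem step_at3 (a b c d e f : String) :
    correctStepPy [a, b, c, d, e, f] 3 = [a, b, c, padB d, e, f] := by
  show (if PySem.Str.len d = 1 then PySem.List.pySetD [a,b,c,d,e,f] 3 ("00" ++ d)
    else if PySem.Str.len d = 2 then PySem.List.pySetD [a,b,c,d,e,f] 3 ("0" ++ d)
    else [a,b,c,d,e,f]) = [a,b,c,padB d,e,f]
  unfold padB; split_ifs <;> rfl

theorem step_at5 (a b c d e f : String) :
    correctStepPy [a, b, c, d, e, f] 5 = [a, b, c, d, e, padB f] := by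
  show (if PySem.Str.len f = 1 then PySem.List.pySetD [a,b,c,d,e,f] 5 ("00" ++ f)
    else if PySem.Str.len f = 2 then PySem.List.pySetD [a,b,c,d,e,f] 5 ("0" ++ f)
    else [a,b,c,d,e,f]) = [a,b,c,d,e,padB f]
  unfold padB; split_ifs <;> rfl

-- the whole correct_number row pass on a 6-element row
theorem pad_fold (a b c d e f : String) :
    ([0, 2, 3, 5] : List Int).foldl correctStepPy [a, b, c, d, e, f]
      = [padB a, b, padB c, padB d, e, padB f] := by
  simp only [List.foldl_cons, List.foldl_nil, step_at0, step_at2, step_at3, step_at5]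

-- ===== VERDICT (by name: the statement is the Claim_ definition above) =====
theorem build_list_name_spec : Claim_equal_build_list_name := by
  intro ra dec _ hpre
  obtain ⟨h1, _, _⟩ := hpre
  show build_list_name ra dec = build_list_name_alt ra dec
  simp only [build_list_name, correctNumberPy, reorganisePy, build_list_name_alt,
    PySem.List.foldl_append_singleton_eq_map, List.nil_append, List.map_map]
  apply List.ext_getElem
  · simp only [List.length_map, PySem.List.length_pyRange_one, PySem.List.len_eq,
      List.length_zip]
    omega
  · intro k hk1 hk2
    have hka : k < ra.length := by
      simpa [PySem.List.length_pyRange_one] using hk1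
    have hkd : k < dec.length := by omega
    simp only [List.getElem_map, Function.comp_apply, PySem.List.getElem_pyRange_one,
      List.getElem_zip, zero_add, PySem.List.pyGetD_natCast,
      List.getD_eq_getElem?_getD, List.getElem?_eq_getElem hka,
      List.getElem?_eq_getElem hkd, Option.getD_some]
    rw [reorg_eval, pad_fold]
    by_cases hd1 : PySem.List.pyGetD dec[k] 0 0 < 0 <;>
      by_cases hd2 : PySem.List.pyGetD dec[k] 1 0 < 0 <;>
        simp [hd1, hd2, slice_toStr_neg]
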